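-- pv_equiv track=rewrite | github.com/PauloCatarino/orcamentos_lanca_encanto | Martelo_Orcamentos_V2/app/services/producao_processos.py | _name_endswith_suffix
-- ===== SOURCE A (Python) =====
-- _FOLDER_PREFIX_SEPARATORS = ("_", "-", " ")
--
-- def _name_endswith_suffix(name: str, suffix: str) -> bool:
--     if not (name or "").strip() or not (suffix or "").strip():
--         return False
--     n = str(name).casefold()
--     s = str(suffix).casefold()
--     if n == s:
--         return True
--     return any(n.endswith(f"{sep}{s}") for sep in _FOLDER_PREFIX_SEPARATORS)
-- ===== SOURCE B (Python) =====
-- # Alternative: a single backward two-pointer character scan that unifies the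
-- # equality case and the separated-suffix case; no endswith and no equality test.
-- def _name_endswith_suffix(name: str, suffix: str) -> bool:
--     if not (name or "").strip() or not (suffix or "").strip():
--         return False
--     n = str(name).casefold()
--     s = str(suffix).casefold()
--     i, j = len(n), len(s)
--     while j > 0:
--         i -= 1
--         j -= 1
--         if i < 0 or n[i] != s[j]:
--             return False
--     return i == 0 or n[i - 1] in "_- "
-- ===== Notes on version B (the rewrite author's own statement) =====
-- stated objective: alternative
-- what changed: Replaces the n==s early return plus the loop of three separator-prefixed endswith probes by one backward two-pointer character scan that matches the suffix in place, then decides by whether the scan consumed the whole name or stopped on a separator character.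
import Mathlib
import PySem

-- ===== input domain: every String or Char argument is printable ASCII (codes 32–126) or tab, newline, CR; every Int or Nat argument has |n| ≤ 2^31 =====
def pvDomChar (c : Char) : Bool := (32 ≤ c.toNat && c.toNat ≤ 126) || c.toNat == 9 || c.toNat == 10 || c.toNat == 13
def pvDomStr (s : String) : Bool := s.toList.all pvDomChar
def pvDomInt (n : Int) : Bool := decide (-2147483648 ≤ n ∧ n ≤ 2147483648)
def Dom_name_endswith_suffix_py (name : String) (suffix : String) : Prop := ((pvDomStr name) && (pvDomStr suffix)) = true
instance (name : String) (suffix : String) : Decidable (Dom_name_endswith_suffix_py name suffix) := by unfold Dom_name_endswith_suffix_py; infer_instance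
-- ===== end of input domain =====

-- B replaces the n==s shortcut plus three separator-prefixed endswith probes by one
-- backward two-pointer character scan (alternative decomposition, same cost class).
-- casefold is ported as PySem.Str.lower, exact on the ASCII domain above.

-- ===== PORT A =====
def name_endswith_suffix_py (name : String) (suffix : String) : Bool :=
  if PySem.Str.strip name == "" || PySem.Str.strip suffix == "" then false
  else
    let n := PySem.Str.lower name
    let s := PySem.Str.lower suffix
    if n == s then true
    else (["_", "-", " "] : List String).any (fun sep => PySem.Str.endswith n (sep ++ s))

-- ===== PORT B =====
-- the Python `while j > 0` backward index loop is ported as the obvious structural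
-- recursion over the two strings read back-to-front (reversed character lists);
-- the remainder of the name list plays the role of the index i
def pvSuffixScan : List Char → List Char → Option (List Char)
  | rn, [] => some rn
  | [], _ :: _ => none
  | c :: rn, d :: rs => if c == d then pvSuffixScan rn rs else none

def name_endswith_suffix_py_alt (name : String) (suffix : String) : Bool :=
  if PySem.Str.strip name == "" || PySem.Str.strip suffix == "" then false
  else
    let n := PySem.Str.lower name
    let s := PySem.Str.lower suffix
    match pvSuffixScan n.toList.reverse s.toList.reverse with
    | none => false                      -- mismatch or name ran out: the loop returned False
    | some [] => true                    -- i == 0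
    | some (c :: _) => c == '_' || c == '-' || c == ' '   -- n[i-1] in "_- "

-- ===== PRECONDITION & SPEC =====
def Spec_name_endswith_suffix_py (name : String) (suffix : String) (out : Bool) : Prop := out = name_endswith_suffix_py_alt name suffix
instance (name : String) (suffix : String) (out : Bool) : Decidable (Spec_name_endswith_suffix_py name suffix out) := by unfold Spec_name_endswith_suffix_py; infer_instance

-- ===== CLAIM (what is proved, stated in full; the proofs are below) =====
def Claim_equal_name_endswith_suffix_py : Prop := ∀ (name : String) (suffix : String), Dom_name_endswith_suffix_py name suffix → Spec_name_endswith_suffix_py name suffix (name_endswith_suffix_py name suffix)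

-- ===== LEMMAS AND PROOFS =====

-- characterisation of the scan: it succeeds exactly when the reversed suffix is a
-- prefix of the reversed name, returning the unmatched remainder
theorem pv_scan_some (rs : List Char) : ∀ (rn t : List Char),
    pvSuffixScan rn rs = some t ↔ rn = rs ++ t := by
  induction rs with
  | nil => intro rn t; simp [pvSuffixScan]
  | cons d rs ih =>
    intro rn t
    cases rn with
    | nil => simp [pvSuffixScan]
    | cons c rn =>
      by_cases h : c = d
      · subst h; simp [pvSuffixScan, ih]
      · simp [pvSuffixScan, h]

-- a suffix of a list is determined by its length
theorem pv_cons_suffix_unique {a b : Char} {S N : List Char}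
    (ha : (a :: S) <:+ N) (hb : (b :: S) <:+ N) : a = b := by
  obtain ⟨t, rfl⟩ := ha
  obtain ⟨u, hu⟩ := hb
  have hlen : u.length = t.length := by
    have := congrArg List.length hu; simp at this; omega
  have := (List.append_inj hu hlen).2
  simpa using this.symm

theorem pv_beq_comm (a b : Char) : (a == b) = (b == a) := by
  by_cases h : a = b
  · subst h; rfl
  · simp [h, Ne.symm h]

theorem pv_main (name suffix : String) :
    name_endswith_suffix_py name suffix = name_endswith_suffix_py_alt name suffix := by
  unfold name_endswith_suffix_py name_endswith_suffix_py_alt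
  split
  · rfl
  · simp only []
    set n := PySem.Str.lower name with hn
    set s := PySem.Str.lower suffix with hs
    have hsw : ∀ sep : String, PySem.Str.endswith n (sep ++ s)
        = PySem.Chars.endswith n.toList (sep.toList ++ s.toList) := fun sep => by
      rw [PySem.Str.endswith_eq, String.toList_append]
    cases hscan : pvSuffixScan n.toList.reverse s.toList.reverse with
    | none =>
      -- the scan failed: s.toList is not a suffix of n.toList
      have hnsuf : ¬ s.toList <:+ n.toList := by
        rintro ⟨u, hu⟩
        have : pvSuffixScan n.toList.reverse s.toList.reverse = some u.reverse := by
          rw [pv_scan_some]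
          rw [← hu]; simp
        simp [hscan] at this
      have hne : (n == s) = false := by
        rw [beq_eq_false_iff_ne]
        intro h
        exact hnsuf (by rw [h])
      have hany : ∀ a : Char, PySem.Chars.endswith n.toList (a :: s.toList) = false := by
        intro a
        rw [← Bool.not_eq_true]
        intro hb
        exact hnsuf ((List.suffix_cons a _).trans ((PySem.Chars.endswith_iff _ _).mp hb))
      simp [hne, show ("_" : String).toList = ['_'] from rfl,
        show ("-" : String).toList = ['-'] from rfl,
        show (" " : String).toList = [' '] from rfl, hany]
    | some t =>
      have hN : n.toList = t.reverse ++ s.toList := by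
        have := (pv_scan_some _ _ _).mp hscan
        have h2 := congrArg List.reverse this
        simpa using h2
      cases t with
      | nil =>
        have : n = s := by
          apply String.ext
          simpa using hN
        simp [this]
      | cons c t' =>
        -- n = t'.reverse ++ [c] ++ s.toList : equality branch is off, suffix char is c
        have hcsuf : (c :: s.toList) <:+ n.toList := ⟨t'.reverse, by simpa using hN.symm⟩
        have hne : (n == s) = false := by
          rw [beq_eq_false_iff_ne]
          intro h
          have : n.toList = s.toList := by rw [h]
          rw [hN] at this
          have := congrArg List.length this
          simp at this
          omega
        have hsep : ∀ a : Char,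
            PySem.Chars.endswith n.toList (a :: s.toList) = (a == c) := by
          intro a
          by_cases hac : a = c
          · subst hac
            exact (PySem.Chars.endswith_iff _ _).mpr hcsuf |>.trans (by simp)
          · rw [Bool.eq_iff_iff]
            constructor
            · intro h
              have := pv_cons_suffix_unique ((PySem.Chars.endswith_iff _ _).mp h) hcsuf
              simp [this]
            · intro h; simp [hac] at h
        simp only [hne, Bool.false_eq_true, if_false, List.any_cons, List.any_nil,
          hsw, show ("_" : String).toList = ['_'] from rfl,
          show ("-" : String).toList = ['-'] from rfl,
          show (" " : String).toList = [' '] from rfl,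
          List.cons_append, List.nil_append, hsep, Bool.or_false]
        rw [pv_beq_comm '_' c, pv_beq_comm '-' c, pv_beq_comm ' ' c, Bool.or_assoc]

-- ===== VERDICT (by name: the statement is the Claim_ definition above) =====
theorem name_endswith_suffix_py_spec : Claim_equal_name_endswith_suffix_py := by
  intro name suffix _
  unfold Spec_name_endswith_suffix_py
  exact pv_main name suffix
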